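-- pv_equiv track=rewrite | github.com/ducanhtp2001/AES | main.py | generateEncryptTextChr
-- ===== SOURCE A (Python) =====
-- def generateEncryptTextChr(encryptText):
--     s = list(encryptText)
--     numState = int(len(s) / 16)
--     state = [[None]*2 for _ in range(numState)]
--     for i in range(numState):
--         state[i] = s[i*16 : i*16 + 16]
--     for i in range(len(state)):
--         for j in range(len(state[i])):
--             state[i][j] = ord(state[i][j])
--     return state
-- ===== SOURCE B (Python) =====
-- def generateEncryptTextChr(encryptText):
--     result = []
--     buf = []
--     for ch in encryptText:
--         buf.append(ord(ch))
--         if len(buf) == 16: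
--             result.append(buf)
--             buf = []
--     return result
-- ===== Notes on version B (the rewrite author's own statement) =====
-- stated objective: simpler
-- what changed: Replaced the index-arithmetic two-phase construction (slice into 16-char blocks by computed indices, then a nested loop mutating each entry to its ord) by a single streaming pass that accumulates char codes in a buffer and flushes it every 16 characters, dropping any trailing partial buffer.
import Mathlib
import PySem

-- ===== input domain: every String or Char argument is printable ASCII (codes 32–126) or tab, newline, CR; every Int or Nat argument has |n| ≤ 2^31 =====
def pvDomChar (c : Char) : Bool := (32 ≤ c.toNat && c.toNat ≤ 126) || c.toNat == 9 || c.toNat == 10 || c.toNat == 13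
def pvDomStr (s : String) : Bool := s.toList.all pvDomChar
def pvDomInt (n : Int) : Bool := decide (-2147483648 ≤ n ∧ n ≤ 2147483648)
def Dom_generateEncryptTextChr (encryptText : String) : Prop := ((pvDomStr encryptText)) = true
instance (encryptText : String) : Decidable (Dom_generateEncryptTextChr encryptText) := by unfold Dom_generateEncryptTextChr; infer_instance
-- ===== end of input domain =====

-- B replaces A's index-arithmetic slicing plus in-place ord rewrite by one streaming pass
-- with a 16-element buffer (objective: simpler); same return value, no speed claim.

-- ===== PORT A =====
-- Port of A: slice the char list into numState = len//16 blocks by index arithmetic,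
-- then map each block's chars to their codes (A's in-place nested rewrite loop).
def generateEncryptTextChr (encryptText : String) : List (List Int) :=
  let s := encryptText.toList
  let numState : Int := PySem.Int.floordiv (s.length : Int) 16
  let state := (PySem.List.pyRange 0 numState 1).map
    (fun i => PySem.List.slice s (some (i * 16)) (some (i * 16 + 16)))
  state.map (fun row => row.map (fun c => (c.toNat : Int)))

-- ===== PORT B =====
-- One step of B's streaming loop: push the char code, flush the buffer at 16.
def pvAltStep (st : List (List Int) × List Int) (c : Char) : List (List Int) × List Int :=
  let buf := st.2 ++ [(c.toNat : Int)]
  if buf.length = 16 then (st.1 ++ [buf], []) else (st.1, buf)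

def generateEncryptTextChr_alt (encryptText : String) : List (List Int) :=
  (encryptText.toList.foldl pvAltStep ([], [])).1

-- ===== PRECONDITION & SPEC =====
def Spec_generateEncryptTextChr (encryptText : String) (out : List (List Int)) : Prop := out = generateEncryptTextChr_alt encryptText
instance (encryptText : String) (out : List (List Int)) : Decidable (Spec_generateEncryptTextChr encryptText out) := by unfold Spec_generateEncryptTextChr; infer_instance

-- ===== CLAIM (what is proved, stated in full; the proofs are below) =====
def Claim_equal_generateEncryptTextChr : Prop := ∀ (encryptText : String), Dom_generateEncryptTextChr encryptText → Spec_generateEncryptTextChr encryptText (generateEncryptTextChr encryptText)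

-- ===== LEMMAS AND PROOFS =====

/-- Full 16-blocks of a list, dropping the trailing partial block (proof-only helper). -/
def pvChunks (xs : List Int) : List (List Int) :=
  if h : 16 ≤ xs.length then
    xs.take 16 :: pvChunks (xs.drop 16)
  else []
termination_by xs.length
decreasing_by simp; omega

lemma pvChunks_short {xs : List Int} (h : xs.length < 16) : pvChunks xs = [] := by
  rw [pvChunks]; simp [Nat.not_le.mpr h]

lemma pvChunks_cons16 (b r : List Int) (hb : b.length = 16) :
    pvChunks (b ++ r) = b :: pvChunks r := by
  rw [pvChunks]
  have h : 16 ≤ (b ++ r).length := by simp [hb]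
  simp [h, List.take_append, List.drop_append, hb]

/-- B's fold invariant: with a partial buffer, the flushed blocks are the 16-chunks. -/
lemma pvFold_eq (l : List Char) : ∀ (res : List (List Int)) (buf : List Int),
    buf.length < 16 →
    (l.foldl pvAltStep (res, buf)).1 = res ++ pvChunks (buf ++ l.map (fun c => (c.toNat : Int))) := by
  induction l with
  | nil => intro res buf h; simp [pvChunks_short h]
  | cons c t ih =>
    intro res buf h
    simp only [List.foldl_cons, List.map_cons, pvAltStep]
    by_cases h16 : (buf ++ [(c.toNat : Int)]).length = 16
    · rw [if_pos h16]
      rw [ih _ [] (by norm_num)]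
      have : buf ++ (c.toNat : Int) :: t.map (fun c => (c.toNat : Int))
          = (buf ++ [(c.toNat : Int)]) ++ t.map (fun c => (c.toNat : Int)) := by simp
      rw [this, pvChunks_cons16 _ _ h16]
      simp
    · rw [if_neg h16]
      rw [ih _ _ (by simp at h16 ⊢; omega)]
      simp

/-- Closed form of pvChunks as an indexed map. -/
lemma pvChunks_eq_range (xs : List Int) :
    pvChunks xs = (List.range (xs.length / 16)).map (fun i => (xs.drop (16 * i)).take 16) := by
  by_cases h : 16 ≤ xs.length
  · rw [pvChunks]; simp only [h, dif_pos]
    have hlen : (xs.drop 16).length = xs.length - 16 := by simp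
    have hdiv : xs.length / 16 = (xs.length - 16) / 16 + 1 := by omega
    rw [pvChunks_eq_range (xs.drop 16), hdiv, List.range_succ_eq_map]
    simp only [List.map_cons, List.map_map, hlen]
    refine List.cons_eq_cons.mpr ⟨by simp, ?_⟩
    apply List.map_congr_left
    intro i _
    simp only [Function.comp_apply, List.drop_drop]
    congr 2
    omega
  · rw [pvChunks_short (by omega)]
    have : xs.length / 16 = 0 := Nat.div_eq_of_lt (by omega)
    simp [this]
termination_by xs.length
decreasing_by simp; omega

lemma pvA_eq_chunks (encryptText : String) :
    generateEncryptTextChr encryptText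
      = pvChunks (encryptText.toList.map (fun c => (c.toNat : Int))) := by
  have hfd : ∀ n : Nat, PySem.Int.floordiv (n : Int) 16 = ((n / 16 : Nat) : Int) := by
    intro n; exact_mod_cast PySem.Int.floordiv_natCast n 16
  rw [pvChunks_eq_range]
  simp only [generateEncryptTextChr, hfd, PySem.List.pyRange_zero_natCast, List.map_map,
    List.length_map]
  apply List.map_congr_left
  intro i hi
  simp only [Function.comp]
  rw [show ((i : Int) * 16) = ((16 * i : Nat) : Int) by push_cast; ring,
      show (((16 * i : Nat) : Int) + 16) = (((16 * i : Nat) : Int) + ((16 : Nat) : Int)) by norm_num,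
      PySem.List.slice_natCast_add]
  simp [List.map_take, List.map_drop]

-- ===== VERDICT (by name: the statement is the Claim_ definition above) =====
theorem generateEncryptTextChr_spec : Claim_equal_generateEncryptTextChr := by
  intro t _
  unfold Spec_generateEncryptTextChr generateEncryptTextChr_alt
  rw [pvFold_eq t.toList [] [] (by norm_num), pvA_eq_chunks]
  simp
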